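-- pv_equiv track=rewrite | github.com/qspp960/Algorithm_ | Divide and Conquer/18222.py | solution
-- ===== SOURCE A (Python) =====
-- def solution(length_x):
--     if length_x == 1:
--         return '0'
--     else:
--         copy_s = solution(length_x//2)
--         result = ''
--         for i in range(len(copy_s)):
--             if copy_s[i] == '0':
--                 result += '1'
--             else:
--                 result += '0'
--         return copy_s + result
-- ===== SOURCE B (Python) =====
-- def solution(length_x):
--     # depth of the halving recursion
--     m = length_x
--     depth = 0
--     while m != 1:
--         m //= 2
--         depth += 1
--     L = 1 << depth
--     out = []
--     for i in range(L):
--         p = 0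
--         j = i
--         while j:
--             p ^= j & 1
--             j >>= 1
--         out.append('1' if p else '0')
--     return ''.join(out)
-- ===== Notes on version B (the rewrite author's own statement) =====
-- stated objective: alternative
-- what changed: Replaces the recursive complement-doubling string construction by computing the halving depth with a loop and then generating each character directly from the popcount parity of its index (closed-form Thue-Morse definition).
-- outside the precondition, e.g. on solution(0): A raises RecursionError, B does not finish within the time limit
import Mathlib
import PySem

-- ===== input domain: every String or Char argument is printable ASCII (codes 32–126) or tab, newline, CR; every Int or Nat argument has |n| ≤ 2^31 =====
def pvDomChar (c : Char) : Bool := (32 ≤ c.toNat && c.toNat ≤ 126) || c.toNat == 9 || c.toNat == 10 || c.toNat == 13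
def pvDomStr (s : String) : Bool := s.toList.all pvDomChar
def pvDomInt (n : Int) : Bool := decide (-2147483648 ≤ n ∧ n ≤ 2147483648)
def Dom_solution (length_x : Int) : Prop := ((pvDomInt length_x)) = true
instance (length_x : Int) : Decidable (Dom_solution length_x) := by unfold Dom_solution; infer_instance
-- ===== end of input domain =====

-- B replaces A's recursive complement-doubling by a closed-form popcount-parity scan; same values on length_x ≥ 1.

-- ===== PORT A =====
-- The complement loop: for i in range(len(copy_s)): result += '1' if copy_s[i]=='0' else '0'
-- (copy_s[i] is always in range here, so getD is exact).
def pyCompLoop (s : List Char) : List Char :=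
  (List.range s.length).foldl (fun acc i => acc ++ [if s.getD i ' ' == '0' then '1' else '0']) []

-- A's recursion, on the nonnegative part of the input (Python diverges for length_x ≤ 0,
-- which Pre_solution excludes; we stop at n ≤ 1 only to make the function total there).
def solAux (n : Nat) : List Char :=
  if _h : n ≤ 1 then ['0']
  else
    let c := solAux (n / 2)
    c ++ pyCompLoop c
termination_by n
decreasing_by exact Nat.div_lt_self (by omega) (by omega)

def solution (length_x : Int) : String := String.mk (solAux length_x.toNat)

-- ===== PORT B =====
-- while m != 1: m //= 2; depth += 1   (stops at m ≤ 1 for totality; Pre_ excludes m ≤ 0)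
def bDepth (m : Nat) : Nat :=
  if _h : m ≤ 1 then 0
  else bDepth (m / 2) + 1
termination_by m
decreasing_by exact Nat.div_lt_self (by omega) (by omega)

-- inner while loop: p ^= j & 1; j >>= 1
def parAux (j p : Nat) : Nat :=
  if _h : j = 0 then p
  else parAux (j / 2) (p ^^^ (j % 2))
termination_by j
decreasing_by exact Nat.div_lt_self (by omega) (by omega)

def solution_alt (length_x : Int) : String :=
  String.mk ((List.range (2 ^ bDepth length_x.toNat)).map
    (fun i => if parAux i 0 ≠ 0 then '1' else '0'))

-- ===== PRECONDITION & SPEC =====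
-- Pre_ excludes length_x ≤ 0, on which Python A recurses forever (RecursionError) and B loops forever.
def Pre_solution (length_x : Int) : Prop := 1 ≤ length_x
instance (length_x : Int) : Decidable (Pre_solution length_x) := by unfold Pre_solution; infer_instance
def pvWitness_solution : Int := (4)

def Spec_solution (length_x : Int) (out : String) : Prop := out = solution_alt length_x
instance (length_x : Int) (out : String) : Decidable (Spec_solution length_x out) := by unfold Spec_solution; infer_instance

-- ===== CLAIM (what is proved, stated in full; the proofs are below) =====
def Claim_equal_solution : Prop := ∀ (length_x : Int), Dom_solution length_x → Pre_solution length_x → Spec_solution length_x (solution length_x)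

-- ===== LEMMAS AND PROOFS =====

def tmChar (i : Nat) : Char := if parAux i 0 ≠ 0 then '1' else '0'

lemma parAux_xor (j : Nat) : ∀ p, parAux j p = p ^^^ parAux j 0 := by
  induction j using Nat.strong_induction_on with
  | _ j ih =>
    intro p
    by_cases h : j = 0
    · simp [parAux, h]
    · conv_lhs => rw [parAux]
      conv_rhs => rw [parAux]
      simp only [h, dif_neg, not_false_iff]
      rw [ih (j / 2) (Nat.div_lt_self (by omega) (by omega)) (p ^^^ j % 2),
          ih (j / 2) (Nat.div_lt_self (by omega) (by omega)) (0 ^^^ j % 2)]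
      simp [Nat.xor_assoc]

lemma par_rec (j : Nat) : parAux j 0 = (j % 2) ^^^ parAux (j / 2) 0 := by
  by_cases h : j = 0
  · simp [h, parAux]
  · conv_lhs => rw [parAux]
    simp only [h, dif_neg, not_false_iff]
    rw [parAux_xor (j / 2)]
    simp

lemma par_le_one (j : Nat) : parAux j 0 ≤ 1 := by
  induction j using Nat.strong_induction_on with
  | _ j ih =>
    by_cases h : j = 0
    · simp [h, parAux]
    · rw [par_rec]
      have h1 : j % 2 ≤ 1 := by omega
      have h2 := ih (j / 2) (Nat.div_lt_self (by omega) (by omega))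
      interval_cases hj : j % 2 <;> interval_cases hp : parAux (j / 2) 0 <;> simp
      -- xor of bits is ≤ 1

lemma par_add_pow (k : Nat) : ∀ i, i < 2 ^ k → parAux (2 ^ k + i) 0 = 1 ^^^ parAux i 0 := by
  induction k with
  | zero =>
    intro i hi
    interval_cases i
    rw [show (2 ^ 0 + 0 : Nat) = 1 from rfl, par_rec 1]
  | succ k ih =>
    intro i hi
    rw [par_rec (2 ^ (k + 1) + i)]
    have hmod : (2 ^ (k + 1) + i) % 2 = i % 2 := by
      have : 2 ^ (k + 1) % 2 = 0 := by
        simp [Nat.pow_succ]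
      omega
    have hdiv : (2 ^ (k + 1) + i) / 2 = 2 ^ k + i / 2 := by
      have h2 : 2 ^ (k + 1) = 2 ^ k * 2 := by ring
      omega
    rw [hmod, hdiv, ih (i / 2) (by
      have h2 : 2 ^ (k + 1) = 2 ^ k * 2 := by ring
      omega)]
    rw [par_rec i]
    have := par_le_one (i / 2)
    have hm : i % 2 ≤ 1 := by omega
    interval_cases hj : i % 2 <;> interval_cases hp : parAux (i / 2) 0 <;> simp

lemma tmChar_add_pow (k i : Nat) (hi : i < 2 ^ k) :
    tmChar (2 ^ k + i) = (if tmChar i == '0' then '1' else '0') := by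
  unfold tmChar
  rw [par_add_pow k i hi]
  have := par_le_one i
  interval_cases hp : parAux i 0 <;> simp

lemma pyCompLoop_eq_map (s : List Char) :
    pyCompLoop s = s.map (fun c => if c == '0' then '1' else '0') := by
  unfold pyCompLoop
  suffices h : ∀ (t : List Char) (acc : List Char),
      (List.range t.length).foldl (fun acc i => acc ++ [if t.getD i ' ' == '0' then '1' else '0']) acc
        = acc ++ t.map (fun c => if c == '0' then '1' else '0') by
    simpa using h s []
  intro t
  induction t with
  | nil => intro acc; simp
  | cons c t ih =>
    intro acc
    simp only [List.length_cons, List.range_succ_eq_map, List.foldl_cons, List.foldl_map,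
      List.getD_cons_zero, List.getD_cons_succ, List.map_cons]
    rw [ih]
    simp

lemma solAux_eq (n : Nat) : solAux n = (List.range (2 ^ bDepth n)).map tmChar := by
  induction n using Nat.strong_induction_on with
  | _ n ih =>
    by_cases h : n ≤ 1
    · rw [solAux, bDepth]
      simp only [h, dif_pos]
      simp [tmChar, parAux]
    · rw [solAux, bDepth]
      simp only [h, dif_neg, not_false_iff]
      rw [ih (n / 2) (Nat.div_lt_self (by omega) (by omega))]
      set k := bDepth (n / 2) with hk
      rw [pyCompLoop_eq_map, List.map_map]
      rw [show (2:Nat) ^ (k + 1) = 2 ^ k + 2 ^ k by ring, List.range_add, List.map_append, List.map_map]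
      congr 1
      apply List.map_congr_left
      intro i hi
      simp only [List.mem_range] at hi
      simp only [Function.comp_apply]
      rw [tmChar_add_pow k i hi]

-- ===== VERDICT (by name: the statement is the Claim_ definition above) =====
theorem solution_spec : Claim_equal_solution := by
  intro n _ _
  unfold Spec_solution solution solution_alt
  rw [solAux_eq]
  rfl
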